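-- pv_equiv track=rewrite | github.com/mukeswebrian/scheduling-tool-dist | controller.py | pick_most_flexible_volunteer
-- ===== SOURCE A (Python) =====
-- def pick_most_flexible_volunteer(vol_sess_lists):
--
--     vol_flex_scores = {}
--     for volunteer_id in vol_sess_lists.keys():
--         vol_flex_scores[volunteer_id] = len(vol_sess_lists[volunteer_id])
--
--     max_score = max(vol_flex_scores.values())
--
--     pick =''
--
--     for volunteer_id in vol_flex_scores.keys():
--         if vol_flex_scores[volunteer_id] == max_score:
--             pick = volunteer_id
--             break
--
--     return pick
-- ===== SOURCE B (Python) =====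
-- def pick_most_flexible_volunteer(vol_sess_lists):
--     best_id = ''
--     best_score = -1
--     for volunteer_id, sessions in vol_sess_lists.items():
--         score = len(sessions)
--         if score > best_score:
--             best_id = volunteer_id
--             best_score = score
--     return best_id
-- ===== Notes on version B (the rewrite author's own statement) =====
-- stated objective: simpler
-- what changed: A builds a score dict, computes the max of its values, then re-scans the dict for the first key reaching it (three passes); B is one pass over the items maintaining the running argmax, updating only on strictly greater score so the first key wins ties.
-- outside the precondition, e.g. on pick_most_flexible_volunteer({}): A raises ValueError, B returns ''
import Mathlib
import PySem

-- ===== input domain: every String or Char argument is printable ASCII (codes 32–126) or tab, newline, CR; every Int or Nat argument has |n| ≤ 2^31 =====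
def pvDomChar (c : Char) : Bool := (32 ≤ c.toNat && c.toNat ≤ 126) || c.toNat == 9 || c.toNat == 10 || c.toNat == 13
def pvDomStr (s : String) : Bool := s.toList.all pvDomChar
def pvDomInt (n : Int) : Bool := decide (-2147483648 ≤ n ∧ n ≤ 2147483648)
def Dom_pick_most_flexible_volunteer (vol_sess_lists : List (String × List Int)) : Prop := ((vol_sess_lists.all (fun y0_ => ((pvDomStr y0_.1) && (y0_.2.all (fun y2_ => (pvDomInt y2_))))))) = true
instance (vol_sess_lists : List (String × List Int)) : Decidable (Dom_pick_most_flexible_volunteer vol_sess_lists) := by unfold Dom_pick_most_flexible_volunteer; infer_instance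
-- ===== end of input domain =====

-- B replaces A's three passes (score dict, max of values, re-scan for the first key at the max)
-- by a single pass over the items keeping the running argmax (strict update keeps the first key on ties).


-- ===== PORT A =====
-- the second for-loop of A: first key whose score equals max_score (break), else the initial pick ''
def pickLoopA (scores : PySem.Dict String Int) (max_score : Int) : List String → String
  | [] => ""
  | k :: rest => if scores.getD k 0 == max_score then k else pickLoopA scores max_score rest

def pick_most_flexible_volunteer (vol_sess_lists : List (String × List Int)) : String :=
  let d := PySem.Dict.ofList vol_sess_lists
  let vol_flex_scores : PySem.Dict String Int :=
    d.keys.foldl (fun sc volunteer_id => sc.insert volunteer_id ((d.getD volunteer_id []).length : Int))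
      PySem.Dict.empty
  match PySem.List.max? vol_flex_scores.values (fun v => v) with
  | none => ""  -- Python raises ValueError (max of empty) here; excluded by Pre_
  | some max_score => pickLoopA vol_flex_scores max_score vol_flex_scores.keys

-- ===== PORT B =====
def pick_most_flexible_volunteer_alt (vol_sess_lists : List (String × List Int)) : String :=
  ((PySem.Dict.ofList vol_sess_lists).items.foldl
    (fun best p => if (p.2.length : Int) > best.2 then (p.1, (p.2.length : Int)) else best)
    ("", -1)).1

-- ===== PRECONDITION & SPEC =====
-- Pre_ excludes only the empty dict, on which A's max() raises ValueError.
def Pre_pick_most_flexible_volunteer (vol_sess_lists : List (String × List Int)) : Prop :=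
  vol_sess_lists ≠ []
instance (vol_sess_lists : List (String × List Int)) : Decidable (Pre_pick_most_flexible_volunteer vol_sess_lists) := by unfold Pre_pick_most_flexible_volunteer; infer_instance

def pvWitness_pick_most_flexible_volunteer : (List (String × List Int)) := [("a", [1, 2]), ("b", [3])]

def Spec_pick_most_flexible_volunteer (vol_sess_lists : List (String × List Int)) (out : String) : Prop := out = pick_most_flexible_volunteer_alt vol_sess_lists
instance (vol_sess_lists : List (String × List Int)) (out : String) : Decidable (Spec_pick_most_flexible_volunteer vol_sess_lists out) := by unfold Spec_pick_most_flexible_volunteer; infer_instance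

-- ===== CLAIM (what is proved, stated in full; the proofs are below) =====
def Claim_equal_pick_most_flexible_volunteer : Prop := ∀ (vol_sess_lists : List (String × List Int)), Dom_pick_most_flexible_volunteer vol_sess_lists → Pre_pick_most_flexible_volunteer vol_sess_lists → Spec_pick_most_flexible_volunteer vol_sess_lists (pick_most_flexible_volunteer vol_sess_lists)

-- ===== LEMMAS AND PROOFS =====

-- first key in an association list whose value equals m (else "")
def firstEq (m : Int) : List (String × Int) → String
  | [] => ""
  | p :: rest => if p.2 == m then p.1 else firstEq m rest

-- B's fold step
def updB (best p : String × Int) : String × Int :=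
  if p.2 > best.2 then p else best

-- A's pick loop over the keys, with lookups, is firstEq over the items
lemma pickLoopA_eq_firstEq (scores : PySem.Dict String Int) (m : Int) :
    ∀ (l : List (String × Int)), (∀ p ∈ l, scores.getD p.1 0 = p.2) →
      pickLoopA scores m (l.map Prod.fst) = firstEq m l := by
  intro l
  induction l with
  | nil => intro _; rfl
  | cons p t ih =>
    intro h
    simp only [List.map_cons, pickLoopA, firstEq, h p (by simp)]
    split
    · rfl
    · exact ih (fun q hq => h q (by simp [hq]))

-- invariant of B's fold
lemma foldl_updB_inv (l : List (String × Int)) :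
    ∀ (b : String × Int),
      (l.foldl updB b).2 = (l.map Prod.snd).foldl max b.2 ∧
      b.2 ≤ (l.foldl updB b).2 ∧
      (l.foldl updB b = b ∨ b.2 < (l.foldl updB b).2) ∧
      (b.2 < (l.foldl updB b).2 → firstEq (l.foldl updB b).2 l = (l.foldl updB b).1) := by
  induction l with
  | nil => intro b; refine ⟨rfl, le_refl _, Or.inl rfl, fun h => absurd h (lt_irrefl _)⟩
  | cons p t ih =>
    intro b
    by_cases hgt : p.2 > b.2
    · have hstep : (p :: t).foldl updB b = t.foldl updB p := by
        simp [List.foldl_cons, updB, hgt]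
      obtain ⟨h1, h2, h3, h4⟩ := ih p
      rw [hstep]
      refine ⟨?_, le_of_lt (lt_of_lt_of_le hgt h2), Or.inr (lt_of_lt_of_le hgt h2), ?_⟩
      · simp only [List.map_cons, List.foldl_cons, h1, max_eq_right (le_of_lt hgt)]
      · intro _
        simp only [firstEq]
        by_cases hpe : p.2 = (t.foldl updB p).2
        · have : t.foldl updB p = p := by
            rcases h3 with h | h
            · exact h
            · exact absurd (hpe ▸ h) (lt_irrefl _)
          simp [this]
        · have hplt : p.2 < (t.foldl updB p).2 := lt_of_le_of_ne h2 hpe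
          have : (p.2 == (t.foldl updB p).2) = false := by
            simp [hpe]
          simp [this, h4 hplt]
    · have hle : p.2 ≤ b.2 := not_lt.mp hgt
      have hstep : (p :: t).foldl updB b = t.foldl updB b := by
        simp [List.foldl_cons, updB, hgt]
      obtain ⟨h1, h2, h3, h4⟩ := ih b
      rw [hstep]
      refine ⟨?_, h2, h3, ?_⟩
      · simp only [List.map_cons, List.foldl_cons, h1, max_eq_left hle]
      · intro hlt
        have hne : (p.2 == (t.foldl updB b).2) = false := by
          simp [ne_of_lt (lt_of_le_of_lt hle hlt)]
        simp only [firstEq, hne]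
        exact h4 hlt

-- central agreement on the items list: first key at the max = running argmax
lemma firstEq_max_eq_argmax (l : List (String × Int)) (hne : l ≠ [])
    (hpos : ∀ p ∈ l, 0 ≤ p.2) :
    ∀ (m : Int), PySem.List.max? (l.map Prod.snd) (fun v => v) = some m →
      firstEq m l = (l.foldl updB ("", -1)).1 := by
  intro m hm
  obtain ⟨h1, _, _, h4⟩ := foldl_updB_inv l ("", -1)
  -- the fold's final score is the max of -1 and the values; all values ≥ 0 so it is m
  obtain ⟨p0, t, rfl⟩ := List.exists_cons_of_ne_nil hne
  rw [List.map_cons, PySem.List.max?_id_cons] at hm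
  have hp0 : (0 : Int) ≤ p0.2 := hpos p0 (by simp)
  have hscore : ((p0 :: t).foldl updB ("", -1)).2 = m := by
    rw [h1]
    simp only [List.map_cons, List.foldl_cons]
    rw [max_eq_right (by omega : (-1 : Int) ≤ p0.2)]
    exact (Option.some_injective _ hm)
  have hlt : (-1 : Int) < ((p0 :: t).foldl updB ("", -1)).2 := by
    rw [hscore, ← Option.some_injective _ hm]
    have := (PySem.List.le_foldl_max (t.map Prod.snd) p0.2).1
    omega
  have := h4 hlt
  rw [hscore] at this
  exact this

-- the keys of the dict built from a nonempty list are nonempty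
lemma keys_ofList_ne_nil (xs : List (String × List Int)) (hne : xs ≠ []) :
    (PySem.Dict.ofList xs).keys ≠ [] := by
  obtain ⟨p0, t, rfl⟩ := List.exists_cons_of_ne_nil hne
  have hk : (PySem.Dict.ofList (p0 :: t)).keys
      = PySem.Set.update (PySem.Dict.empty (κ := String) (ν := List Int)).keys ((p0 :: t).map Prod.fst) :=
    PySem.Dict.keys_foldl_insert_key (p0 :: t) Prod.fst (fun _ p => p.2) PySem.Dict.empty
  rw [hk, PySem.Dict.keys_empty, PySem.Set.update_nil_left]
  intro hnil
  have : p0.1 ∈ PySem.Set.ofList ((p0 :: t).map Prod.fst) :=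
    (PySem.Set.mem_ofList _ _).mpr (by simp)
  rw [hnil] at this
  exact absurd this (List.not_mem_nil)

-- ===== VERDICT (by name: the statement is the Claim_ definition above) =====
theorem pick_most_flexible_volunteer_spec : Claim_equal_pick_most_flexible_volunteer := by
  intro xs _ hpre
  unfold Spec_pick_most_flexible_volunteer
  unfold pick_most_flexible_volunteer pick_most_flexible_volunteer_alt
  dsimp only
  set d := PySem.Dict.ofList xs with hd
  have hknd : d.keys.Nodup := PySem.Dict.nodup_keys_ofList xs
  -- the score dict's items are the keys paired with the lengths
  have hitems :
      (d.keys.foldl (fun sc k => sc.insert k ((d.getD k []).length : Int)) PySem.Dict.empty).items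
        = d.keys.map (fun k => (k, ((d.getD k []).length : Int))) := by
    have := PySem.Dict.items_foldl_insert_fresh d.keys (fun k => k)
      (fun k => ((d.getD k []).length : Int)) PySem.Dict.empty
      (fun a _ => PySem.Dict.contains_empty a) (by simpa using hknd)
    simpa using this
  set scores := d.keys.foldl (fun sc k => sc.insert k ((d.getD k []).length : Int)) PySem.Dict.empty with hs
  set l := d.keys.map (fun k => (k, ((d.getD k []).length : Int))) with hl
  have hlne : l ≠ [] := by
    simp only [hl, ne_eq, List.map_eq_nil_iff]
    exact keys_ofList_ne_nil xs hpre
  have hpos : ∀ p ∈ l, (0 : Int) ≤ p.2 := by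
    intro p hp
    simp only [hl, List.mem_map] at hp
    obtain ⟨k, _, rfl⟩ := hp
    exact Int.natCast_nonneg _
  have hskeys : scores.keys = l.map Prod.fst := by
    simp only [PySem.Dict.keys, hitems, List.map_map, hl]
  have hsknd : scores.keys.Nodup := by
    rw [hskeys, hl, List.map_map]
    have hid : (Prod.fst ∘ fun k => (k, ((d.getD k []).length : Int))) = id := rfl
    rw [hid, List.map_id]
    exact hknd
  have hsvals : scores.values = l.map Prod.snd := by
    simp only [PySem.Dict.values, hitems, List.map_map, hl]
  have hget : ∀ p ∈ l, scores.getD p.1 0 = p.2 := by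
    intro p hp
    exact PySem.Dict.getD_of_mem_items scores (by rw [hitems]; exact (Prod.mk.eta (p := p)) ▸ hp) hsknd 0
  -- B's fold over d.items is the fold of updB over l
  have hB : (d.items.foldl
      (fun best p => if ((p.2.length : Int)) > best.2 then (p.1, ((p.2.length : Int))) else best)
      ("", -1)) = l.foldl updB ("", -1) := by
    have hdi : d.items = d.keys.map (fun k => (k, d.getD k [])) :=
      PySem.Dict.items_eq_map_keys d hknd []
    rw [hdi, List.foldl_map, hl, List.foldl_map]
    rfl
  rw [hsvals, hskeys]
  cases hmax : PySem.List.max? (l.map Prod.snd) (fun v => v) with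
  | none =>
    exact absurd ((PySem.List.max?_eq_none_iff _ _).mp hmax) (by simpa [hl] using hlne)
  | some m =>
    show pickLoopA scores m (List.map Prod.fst l) = _
    rw [pickLoopA_eq_firstEq scores m l hget,
      firstEq_max_eq_argmax l hlne hpos m hmax, hB]
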